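-- pv_equiv track=rewrite | github.com/hu-music/UPMT | model.py | pitchclass
-- ===== SOURCE A (Python) =====
-- def pitchclass(noteon_temp):
--     pitch_class=[]
--     for i in range(len(noteon_temp)):
--         if noteon_temp[i]<12:
--             pitch_class.append(-1)
--         elif 12<=noteon_temp[i]<24:
--             pitch_class.append(0)
--         elif 24<=noteon_temp[i]<36:
--             pitch_class.append(1)
--         elif 36<=noteon_temp[i]<48:
--             pitch_class.append(2)
--         elif 48<=noteon_temp[i]<60:
--             pitch_class.append(3)
--         elif 60<=noteon_temp[i]<72:
--             pitch_class.append(4)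
--         elif 72<=noteon_temp[i]<84:
--             pitch_class.append(5)
--         elif 84<=noteon_temp[i]<96:
--             pitch_class.append(6)
--         elif 96<=noteon_temp[i]<108:
--             pitch_class.append(7)
--         elif 108<=noteon_temp[i]<120:
--             pitch_class.append(8)
--         elif 120<=noteon_temp[i]<128:
--             pitch_class.append(9)
--     return pitch_class
-- ===== SOURCE B (Python) =====
-- def pitchclass(noteon_temp):
--     return [max(x // 12 - 1, -1) for x in noteon_temp if x < 128]
-- ===== Notes on version B (the rewrite author's own statement) =====
-- stated objective: simpler
-- what changed: Replaces the 11-branch elif cascade that appends via a mutated accumulator with a one-line comprehension computing the bucket in closed form as max(x//12 - 1, -1), skipping x >= 128.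
import Mathlib
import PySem

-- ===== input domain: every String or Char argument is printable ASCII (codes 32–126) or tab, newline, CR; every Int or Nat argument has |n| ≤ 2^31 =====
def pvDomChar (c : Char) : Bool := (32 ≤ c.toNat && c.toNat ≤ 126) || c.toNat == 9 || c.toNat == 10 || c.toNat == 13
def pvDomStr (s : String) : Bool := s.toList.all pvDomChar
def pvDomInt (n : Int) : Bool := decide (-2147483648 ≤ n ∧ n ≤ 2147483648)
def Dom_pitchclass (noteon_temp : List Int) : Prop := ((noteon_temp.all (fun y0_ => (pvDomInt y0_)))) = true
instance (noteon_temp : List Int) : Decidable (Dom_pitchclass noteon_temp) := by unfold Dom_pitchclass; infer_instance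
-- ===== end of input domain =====

-- B replaces A's 11-branch elif cascade by a one-line comprehension with the closed-form bucket max(x//12 - 1, -1); same results.

-- ===== PORT A =====
-- literal transliteration: index loop over range(len), elif cascade appending to an accumulator
def pitchclass (noteon_temp : List Int) : List Int :=
  (PySem.List.pyRange 0 (PySem.List.len noteon_temp) 1).foldl
    (fun pitch_class i =>
      let x := PySem.List.pyGetD noteon_temp i 0
      if x < 12 then pitch_class ++ [-1]
      else if 12 ≤ x ∧ x < 24 then pitch_class ++ [0]
      else if 24 ≤ x ∧ x < 36 then pitch_class ++ [1]
      else if 36 ≤ x ∧ x < 48 then pitch_class ++ [2]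
      else if 48 ≤ x ∧ x < 60 then pitch_class ++ [3]
      else if 60 ≤ x ∧ x < 72 then pitch_class ++ [4]
      else if 72 ≤ x ∧ x < 84 then pitch_class ++ [5]
      else if 84 ≤ x ∧ x < 96 then pitch_class ++ [6]
      else if 96 ≤ x ∧ x < 108 then pitch_class ++ [7]
      else if 108 ≤ x ∧ x < 120 then pitch_class ++ [8]
      else if 120 ≤ x ∧ x < 128 then pitch_class ++ [9]
      else pitch_class) []

-- ===== PORT B =====
-- literal transliteration of Source B's comprehension: filter x < 128, map the closed-form bucket
def pitchclass_alt (noteon_temp : List Int) : List Int :=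
  (noteon_temp.filter (fun x => x < 128)).map
    (fun x => max (PySem.Int.floordiv x 12 - 1) (-1))

-- ===== PRECONDITION & SPEC =====
def Spec_pitchclass (noteon_temp : List Int) (out : List Int) : Prop := out = pitchclass_alt noteon_temp
instance (noteon_temp : List Int) (out : List Int) : Decidable (Spec_pitchclass noteon_temp out) := by unfold Spec_pitchclass; infer_instance

-- ===== CLAIM (what is proved, stated in full; the proofs are below) =====
def Claim_equal_pitchclass : Prop := ∀ (noteon_temp : List Int), Dom_pitchclass noteon_temp → Spec_pitchclass noteon_temp (pitchclass noteon_temp)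

-- ===== LEMMAS AND PROOFS =====

-- per-element agreement of the cascade with the closed-form bucket
set_option maxHeartbeats 1000000 in
theorem pitchclass_step_eq (pitch_class : List Int) (x : Int) :
    (if x < 12 then pitch_class ++ [-1]
      else if 12 ≤ x ∧ x < 24 then pitch_class ++ [0]
      else if 24 ≤ x ∧ x < 36 then pitch_class ++ [1]
      else if 36 ≤ x ∧ x < 48 then pitch_class ++ [2]
      else if 48 ≤ x ∧ x < 60 then pitch_class ++ [3]
      else if 60 ≤ x ∧ x < 72 then pitch_class ++ [4]
      else if 72 ≤ x ∧ x < 84 then pitch_class ++ [5]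
      else if 84 ≤ x ∧ x < 96 then pitch_class ++ [6]
      else if 96 ≤ x ∧ x < 108 then pitch_class ++ [7]
      else if 108 ≤ x ∧ x < 120 then pitch_class ++ [8]
      else if 120 ≤ x ∧ x < 128 then pitch_class ++ [9]
      else pitch_class)
    = (if x < 128 then pitch_class ++ [max (PySem.Int.floordiv x 12 - 1) (-1)] else pitch_class) := by
  rw [PySem.Int.floordiv_eq_ediv_of_pos (by norm_num)]
  split_ifs <;>
    first
    | rfl
    | omega
    | (simp only [List.append_right_inj, List.cons.injEq, and_true]; omega)

-- the cascade fold over any suffix produces the filtered-and-mapped list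
theorem pitchclass_fold_eq (l : List Int) (acc : List Int) :
    l.foldl
      (fun pitch_class x =>
        if x < 12 then pitch_class ++ [-1]
        else if 12 ≤ x ∧ x < 24 then pitch_class ++ [0]
        else if 24 ≤ x ∧ x < 36 then pitch_class ++ [1]
        else if 36 ≤ x ∧ x < 48 then pitch_class ++ [2]
        else if 48 ≤ x ∧ x < 60 then pitch_class ++ [3]
        else if 60 ≤ x ∧ x < 72 then pitch_class ++ [4]
        else if 72 ≤ x ∧ x < 84 then pitch_class ++ [5]
        else if 84 ≤ x ∧ x < 96 then pitch_class ++ [6]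
        else if 96 ≤ x ∧ x < 108 then pitch_class ++ [7]
        else if 108 ≤ x ∧ x < 120 then pitch_class ++ [8]
        else if 120 ≤ x ∧ x < 128 then pitch_class ++ [9]
        else pitch_class) acc
    = acc ++ (l.filter (fun x => x < 128)).map (fun x => max (PySem.Int.floordiv x 12 - 1) (-1)) := by
  induction l generalizing acc with
  | nil => simp
  | cons y ys ih =>
    rw [List.foldl_cons, pitchclass_step_eq, List.filter_cons]
    by_cases h : y < 128
    · simp only [h, if_pos, decide_true, ih, List.map_cons, List.append_assoc,
        List.singleton_append]
    · rw [if_neg h, ih]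
      simp only [decide_eq_true_eq, h, if_false]

-- ===== VERDICT (by name: the statement is the Claim_ definition above) =====
theorem pitchclass_spec : Claim_equal_pitchclass := by
  intro noteon_temp _
  show pitchclass noteon_temp = pitchclass_alt noteon_temp
  unfold pitchclass pitchclass_alt
  rw [PySem.List.foldl_pyRange_zero_pyGetD noteon_temp 0
    (fun pitch_class x =>
      if x < 12 then pitch_class ++ [-1]
      else if 12 ≤ x ∧ x < 24 then pitch_class ++ [0]
      else if 24 ≤ x ∧ x < 36 then pitch_class ++ [1]
      else if 36 ≤ x ∧ x < 48 then pitch_class ++ [2]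
      else if 48 ≤ x ∧ x < 60 then pitch_class ++ [3]
      else if 60 ≤ x ∧ x < 72 then pitch_class ++ [4]
      else if 72 ≤ x ∧ x < 84 then pitch_class ++ [5]
      else if 84 ≤ x ∧ x < 96 then pitch_class ++ [6]
      else if 96 ≤ x ∧ x < 108 then pitch_class ++ [7]
      else if 108 ≤ x ∧ x < 120 then pitch_class ++ [8]
      else if 120 ≤ x ∧ x < 128 then pitch_class ++ [9]
      else pitch_class) []]
  rw [pitchclass_fold_eq]
  simp
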